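-- pv_equiv track=rewrite | github.com/jramaswami/LeetCode_Python | maximum_bags_with_full_capacity_of_rocks.py | maximumBags
-- ===== SOURCE A (Python) =====
-- from typing import List
--
-- def maximumBags(capacity: List[int], rocks: List[int], additionalRocks: int) -> int:
--     deltas = [c - r for c, r in zip(capacity, rocks)]
--     deltas.sort()
--     soln = 0
--     for d in deltas:
--         if d <= additionalRocks:
--             additionalRocks -= d
--             soln += 1
--     return soln
-- ===== SOURCE B (Python) =====
-- def maximumBags(capacity, rocks, additionalRocks):
--     deltas = sorted(c - r for c, r in zip(capacity, rocks))
--     sums = []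
--     total = 0
--     for d in deltas:
--         total += d
--         sums.append(total)
--     count = 0
--     while count < len(sums) and sums[count] <= additionalRocks:
--         count += 1
--     return count
-- ===== Notes on version B (the rewrite author's own statement) =====
-- stated objective: alternative
-- what changed: Replaces the greedy shrinking-budget accept/skip loop with building the prefix-sum table of the sorted deltas once and returning the length of its initial segment of sums <= additionalRocks (a fixed-threshold takeWhile scan); equivalence rests on the sorted greedy never accepting after its first rejection.
import Mathlib
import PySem

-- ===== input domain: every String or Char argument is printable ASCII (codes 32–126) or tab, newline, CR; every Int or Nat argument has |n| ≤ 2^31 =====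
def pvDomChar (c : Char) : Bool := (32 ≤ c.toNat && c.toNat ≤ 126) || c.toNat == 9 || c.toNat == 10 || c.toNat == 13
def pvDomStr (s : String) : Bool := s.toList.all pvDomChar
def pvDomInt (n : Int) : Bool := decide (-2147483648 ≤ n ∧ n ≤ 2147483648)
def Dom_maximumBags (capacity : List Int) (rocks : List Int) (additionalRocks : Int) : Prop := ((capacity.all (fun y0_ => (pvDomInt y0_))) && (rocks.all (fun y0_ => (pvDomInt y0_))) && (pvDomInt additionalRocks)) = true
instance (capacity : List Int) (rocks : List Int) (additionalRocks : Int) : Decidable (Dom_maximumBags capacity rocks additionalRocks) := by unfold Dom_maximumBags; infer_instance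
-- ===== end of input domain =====

-- ===== PORT A =====
-- Greedy: sort the deltas, then one pass with a shrinking budget and an accept counter.
def maximumBags (capacity : List Int) (rocks : List Int) (additionalRocks : Int) : Int :=
  let deltas := PySem.List.sorted (List.zipWith (fun c r => c - r) capacity rocks) (fun x => x) false
  let st := deltas.foldl
    (fun (st : Int × Int) d => if d ≤ st.2 then (st.1 + 1, st.2 - d) else st)
    ((0 : Int), additionalRocks)
  st.1

-- ===== PORT B =====
-- B: sort the deltas, build the prefix-sum table, return the length of its
-- initial segment of sums ≤ additionalRocks (fixed-threshold takeWhile scan).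
def altSums : List Int → Int → List Int
  | [], _ => []
  | d :: ds, t => (t + d) :: altSums ds (t + d)

def altCount : List Int → Int → Int
  | [], _ => 0
  | s :: ss, x => if s ≤ x then 1 + altCount ss x else 0

def maximumBags_alt (capacity : List Int) (rocks : List Int) (additionalRocks : Int) : Int :=
  let deltas := PySem.List.sorted (List.zipWith (fun c r => c - r) capacity rocks) (fun x => x) false
  altCount (altSums deltas 0) additionalRocks

-- ===== PRECONDITION & SPEC =====
def Spec_maximumBags (capacity : List Int) (rocks : List Int) (additionalRocks : Int) (out : Int) : Prop := out = maximumBags_alt capacity rocks additionalRocks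
instance (capacity : List Int) (rocks : List Int) (additionalRocks : Int) (out : Int) : Decidable (Spec_maximumBags capacity rocks additionalRocks out) := by unfold Spec_maximumBags; infer_instance

-- ===== CLAIM (what is proved, stated in full; the proofs are below) =====
def Claim_equal_maximumBags : Prop := ∀ (capacity : List Int) (rocks : List Int) (additionalRocks : Int), Dom_maximumBags capacity rocks additionalRocks → Spec_maximumBags capacity rocks additionalRocks (maximumBags capacity rocks additionalRocks)

-- ===== LEMMAS AND PROOFS =====

-- Shifting the running total of the prefix sums shifts the threshold.
theorem altCount_altSums_shift (ds : List Int) (t c x : Int) :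
    altCount (altSums ds t) x = altCount (altSums ds (t + c)) (x + c) := by
  induction ds generalizing t with
  | nil => simp [altSums, altCount]
  | cons d ds ih =>
    simp only [altSums, altCount]
    rw [show t + c + d = t + d + c by ring, ← ih (t + d)]
    split_ifs with h1 h2 h2 <;> first | rfl | omega

-- Once every remaining delta exceeds the budget, the greedy fold is inert.
theorem greedy_inert (ds : List Int) (st : Int × Int)
    (h : ∀ y ∈ ds, st.2 < y) :
    ds.foldl (fun (st : Int × Int) d => if d ≤ st.2 then (st.1 + 1, st.2 - d) else st) st = st := by
  induction ds with
  | nil => rfl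
  | cons d ds ih =>
    have hd : ¬ d ≤ st.2 := by have := h d (by simp); omega
    simp only [List.foldl_cons, hd, if_false]
    exact ih (fun y hy => h y (by simp [hy]))

-- Core invariant over any ≤-sorted list: the greedy count equals the
-- takeWhile length of the prefix-sum table.
theorem greedy_eq_count (ds : List Int) (hs : ds.Pairwise (· ≤ ·)) (acc x : Int) :
    (ds.foldl (fun (st : Int × Int) d => if d ≤ st.2 then (st.1 + 1, st.2 - d) else st) (acc, x)).1
      = acc + altCount (altSums ds 0) x := by
  induction ds generalizing acc x with
  | nil => simp [altSums, altCount]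
  | cons d ds ih =>
    rcases List.pairwise_cons.mp hs with ⟨hall, htail⟩
    by_cases hd : d ≤ x
    · simp only [List.foldl_cons, hd, if_true, altSums, altCount, zero_add]
      rw [ih htail (acc + 1) (x - d)]
      rw [altCount_altSums_shift ds 0 d (x - d)]
      simp only [zero_add, sub_add_cancel]
      ring
    · simp only [List.foldl_cons, hd, if_false, altSums, altCount, zero_add]
      rw [greedy_inert ds (acc, x) (fun y hy => by have := hall y hy; simp; omega)]
      simp

-- ===== VERDICT (by name: the statement is the Claim_ definition above) =====
theorem maximumBags_spec : Claim_equal_maximumBags := by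
  intro capacity rocks additionalRocks _
  show _ = _
  unfold maximumBags maximumBags_alt
  simp only []
  rw [greedy_eq_count _ (by simpa using PySem.List.sorted_pairwise (xs := List.zipWith (fun c r => c - r) capacity rocks) (key := fun x => x)) 0 additionalRocks]
  ring
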